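-- pv_equiv track=rewrite | github.com/YaoyaoFr/Deconvolution | balloon_filter/functions.py | get_BOLD_neural_ranges
-- ===== SOURCE A (Python) =====
-- def get_BOLD_neural_ranges(neural_seq_length=None, BOLD_seq_length=None, HRF_length=None):
--     # Pre_check
--     if neural_seq_length is None:
--         raise TypeError('Please input the length of neural sequence!')
--     if BOLD_seq_length is None:
--         raise TypeError('Please input the length of BOLD sequence!')
--     if HRF_length is None:
--         raise TypeError('Please input the length of Hemodynamic Response Function!')
--
--     #  Generate neural range temporaly
--     neural_range_of_BOLD_time_point_temp=[[row-HRF_length+1,row] for row in range(BOLD_seq_length)]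
--
--     # Exclude unreasonable neural range
--     neural_range_of_BOLD_time_point=dict()
--     for i in range(BOLD_seq_length):
--         if (neural_range_of_BOLD_time_point_temp[i])[0]>=0 and (neural_range_of_BOLD_time_point_temp[i])[1]<neural_seq_length:
--             neural_range_of_BOLD_time_point[i]=neural_range_of_BOLD_time_point_temp[i]
--
--     # Generate BOLD range temporaly
--     BOLD_range_of_neural_time_point_temp=[[row,row+HRF_length-1] for row in range(neural_seq_length)]
--
--     # Exclude unrasonable BOLD range
--     BOLD_range_of_neural_time_point=dict()
--     for i in range(neural_seq_length):
--         if((BOLD_range_of_neural_time_point_temp[i])[1]<=neural_seq_length):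
--             BOLD_range_of_neural_time_point[i]=BOLD_range_of_neural_time_point_temp[i]
--
--     return BOLD_range_of_neural_time_point,neural_range_of_BOLD_time_point
-- ===== SOURCE B (Python) =====
-- def get_BOLD_neural_ranges(neural_seq_length=None, BOLD_seq_length=None, HRF_length=None):
--     if neural_seq_length is None:
--         raise TypeError('Please input the length of neural sequence!')
--     if BOLD_seq_length is None:
--         raise TypeError('Please input the length of BOLD sequence!')
--     if HRF_length is None:
--         raise TypeError('Please input the length of Hemodynamic Response Function!')
--
--     # valid neural-range keys form one contiguous interval: HRF_length-1 <= i < min(BOLD, neural)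
--     lo = max(0, HRF_length - 1)
--     hi = min(BOLD_seq_length, neural_seq_length)
--     neural_range_of_BOLD_time_point = {i: [i - HRF_length + 1, i] for i in range(lo, hi)}
--
--     # valid BOLD-range keys: 0 <= i < min(neural, neural - HRF_length + 2)
--     hi2 = min(neural_seq_length, neural_seq_length - HRF_length + 2)
--     BOLD_range_of_neural_time_point = {i: [i, i + HRF_length - 1] for i in range(hi2)}
--
--     return BOLD_range_of_neural_time_point, neural_range_of_BOLD_time_point
-- ===== Notes on version B (the rewrite author's own statement) =====
-- stated objective: faster
-- what changed: Replaces A's two temp lists and per-element filtering loops by computing each dict's contiguous valid key interval in closed form and building it with one dict comprehension over that interval.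
import Mathlib
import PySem

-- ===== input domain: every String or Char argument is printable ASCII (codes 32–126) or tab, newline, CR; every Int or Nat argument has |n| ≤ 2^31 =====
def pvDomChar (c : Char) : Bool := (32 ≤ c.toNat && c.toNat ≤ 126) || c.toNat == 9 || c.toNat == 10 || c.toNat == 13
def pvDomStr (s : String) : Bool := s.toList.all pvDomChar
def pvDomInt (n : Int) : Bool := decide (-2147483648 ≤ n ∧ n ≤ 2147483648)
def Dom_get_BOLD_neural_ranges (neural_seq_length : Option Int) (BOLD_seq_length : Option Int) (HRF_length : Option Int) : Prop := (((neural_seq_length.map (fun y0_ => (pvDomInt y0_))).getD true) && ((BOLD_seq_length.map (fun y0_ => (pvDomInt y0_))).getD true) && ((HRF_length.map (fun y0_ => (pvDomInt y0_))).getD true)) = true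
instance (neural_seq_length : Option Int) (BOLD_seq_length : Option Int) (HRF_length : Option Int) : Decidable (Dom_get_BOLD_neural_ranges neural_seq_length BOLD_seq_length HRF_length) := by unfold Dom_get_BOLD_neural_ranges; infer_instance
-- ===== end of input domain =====

-- B replaces A's two temp lists and filtering loops by computing each dict's
-- contiguous valid key interval in closed form, doing work proportional to the output only (objective: faster).

-- ===== PORT A =====
-- Literal port of A. The `none` branches are where Python raises TypeError
-- (excluded by Pre_); the pyGetD defaults are never used: every index i lies
-- in range of the temp list built over the same range.
def get_BOLD_neural_ranges (neural_seq_length : Option Int) (BOLD_seq_length : Option Int) (HRF_length : Option Int) : (List (Int × List Int)) × (List (Int × List Int)) :=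
  match neural_seq_length, BOLD_seq_length, HRF_length with
  | some ns, some bs, some hs =>
    let neural_temp : List (List Int) :=
      (PySem.List.pyRange 0 bs 1).map (fun row => [row - hs + 1, row])
    let neural_d : PySem.Dict Int (List Int) :=
      (PySem.List.pyRange 0 bs 1).foldl (fun d i =>
        if PySem.List.pyGetD (PySem.List.pyGetD neural_temp i []) 0 0 ≥ 0 ∧
           PySem.List.pyGetD (PySem.List.pyGetD neural_temp i []) 1 0 < ns
        then d.insert i (PySem.List.pyGetD neural_temp i []) else d) PySem.Dict.empty
    let bold_temp : List (List Int) :=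
      (PySem.List.pyRange 0 ns 1).map (fun row => [row, row + hs - 1])
    let bold_d : PySem.Dict Int (List Int) :=
      (PySem.List.pyRange 0 ns 1).foldl (fun d i =>
        if PySem.List.pyGetD (PySem.List.pyGetD bold_temp i []) 1 0 ≤ ns
        then d.insert i (PySem.List.pyGetD bold_temp i []) else d) PySem.Dict.empty
    (bold_d.items, neural_d.items)
  | _, _, _ => ([], [])

-- ===== PORT B =====
def get_BOLD_neural_ranges_alt (neural_seq_length : Option Int) (BOLD_seq_length : Option Int) (HRF_length : Option Int) : (List (Int × List Int)) × (List (Int × List Int)) :=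
  match neural_seq_length with
  | none => ([], [])
  | some ns =>
  match BOLD_seq_length with
  | none => ([], [])
  | some bs =>
  match HRF_length with
  | none => ([], [])
  | some hs =>
    let lo := max 0 (hs - 1)
    let hi := min bs ns
    let neural_range : List (Int × List Int) :=
      (PySem.List.pyRange lo hi 1).map (fun i => (i, [i - hs + 1, i]))
    let hi2 := min ns (ns - hs + 2)
    let bold_range : List (Int × List Int) :=
      (PySem.List.pyRange 0 hi2 1).map (fun i => (i, [i, i + hs - 1]))
    (bold_range, neural_range)

-- ===== PRECONDITION & SPEC =====
-- Pre_ excludes exactly the inputs where any argument is None: Python A raises TypeError there.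
def Pre_get_BOLD_neural_ranges (neural_seq_length : Option Int) (BOLD_seq_length : Option Int) (HRF_length : Option Int) : Prop :=
  neural_seq_length.isSome = true ∧ BOLD_seq_length.isSome = true ∧ HRF_length.isSome = true
instance (neural_seq_length : Option Int) (BOLD_seq_length : Option Int) (HRF_length : Option Int) : Decidable (Pre_get_BOLD_neural_ranges neural_seq_length BOLD_seq_length HRF_length) := by unfold Pre_get_BOLD_neural_ranges; infer_instance
def pvWitness_get_BOLD_neural_ranges : Option Int × Option Int × Option Int := (some 5, some 5, some 3)

def Spec_get_BOLD_neural_ranges (neural_seq_length : Option Int) (BOLD_seq_length : Option Int) (HRF_length : Option Int) (out : (List (Int × List Int)) × (List (Int × List Int))) : Prop := out = get_BOLD_neural_ranges_alt neural_seq_length BOLD_seq_length HRF_length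
instance (neural_seq_length : Option Int) (BOLD_seq_length : Option Int) (HRF_length : Option Int) (out : (List (Int × List Int)) × (List (Int × List Int))) : Decidable (Spec_get_BOLD_neural_ranges neural_seq_length BOLD_seq_length HRF_length out) := by unfold Spec_get_BOLD_neural_ranges; infer_instance

-- ===== CLAIM (what is proved, stated in full; the proofs are below) =====
def Claim_equal_get_BOLD_neural_ranges : Prop := ∀ (neural_seq_length : Option Int) (BOLD_seq_length : Option Int) (HRF_length : Option Int), Dom_get_BOLD_neural_ranges neural_seq_length BOLD_seq_length HRF_length → Pre_get_BOLD_neural_ranges neural_seq_length BOLD_seq_length HRF_length → Spec_get_BOLD_neural_ranges neural_seq_length BOLD_seq_length HRF_length (get_BOLD_neural_ranges neural_seq_length BOLD_seq_length HRF_length)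

-- ===== LEMMAS AND PROOFS =====

-- filtering an integer range by an interval test yields the clipped range
lemma filter_pyRange_interval (a b l h : Int) :
    (PySem.List.pyRange a b 1).filter (fun x => decide (l ≤ x ∧ x < h))
      = PySem.List.pyRange (max a l) (min b h) 1 := by
  by_cases hab : b ≤ a
  · rw [PySem.List.pyRange_one_eq_nil hab, PySem.List.pyRange_one_eq_nil (by omega)]
    rfl
  · have hlt : a < b := by omega
    have hsz : ((b - (a + 1)).toNat) < ((b - a).toNat) := by omega
    rw [PySem.List.pyRange_one_cons hlt, List.filter_cons]
    have ih := filter_pyRange_interval (a + 1) b l h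
    by_cases hc : l ≤ a ∧ a < h
    · simp only [hc, decide_true, and_self, if_true, ih,
        show max (a + 1) l = a + 1 by omega, show max a l = a by omega]
      exact (PySem.List.pyRange_one_cons (by omega)).symm
    · simp only [decide_eq_true_eq, hc, if_false, ih]
      rcases not_and_or.mp hc with hla | hha
      · rw [show max (a + 1) l = l by omega, show max a l = l by omega]
      · rw [PySem.List.pyRange_one_eq_nil (by omega),
            PySem.List.pyRange_one_eq_nil (by omega)]
termination_by (b - a).toNat

lemma fold_insert_range_items (lst : List Int) (hnd : lst.Nodup) (v : Int → List Int) :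
    ((lst.foldl (fun d i => d.insert i (v i)) PySem.Dict.empty).items
      : List (Int × List Int)) = lst.map (fun i => (i, v i)) := by
  have := PySem.Dict.items_foldl_insert_fresh (l := lst) (k := fun i => i)
    (v := v) (d := PySem.Dict.empty) (by intro a _; rfl) (by simpa using hnd)
  simpa using this

-- one filtered-insert loop of A equals the clipped-range map
lemma loop_eq_clipped (n l h : Int) (v : Int → List Int)
    (P : Int → Prop) [DecidablePred P] (hP : ∀ i, 0 ≤ i → (P i ↔ l ≤ i ∧ i < h)) :
    ((PySem.List.pyRange 0 n 1).foldl
        (fun d i => if P i then d.insert i (v i) else d) PySem.Dict.empty).items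
      = (PySem.List.pyRange (max 0 l) (min n h) 1).map (fun i => (i, v i)) := by
  rw [PySem.List.foldl_ite_eq_foldl_filter]
  have hfc : (PySem.List.pyRange 0 n 1).filter (fun i => decide (P i))
      = (PySem.List.pyRange 0 n 1).filter (fun x => decide (l ≤ x ∧ x < h)) := by
    apply List.filter_congr
    intro x hx
    have hx0 : 0 ≤ x := (PySem.List.mem_pyRange_one.mp hx).1
    simp [hP x hx0]
  rw [hfc, filter_pyRange_interval]
  exact fold_insert_range_items _ (PySem.List.nodup_pyRange_one _ _) v

theorem get_BOLD_neural_ranges_eq_alt (ns bs hs : Int) :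
    get_BOLD_neural_ranges (some ns) (some bs) (some hs)
      = get_BOLD_neural_ranges_alt (some ns) (some bs) (some hs) := by
  unfold get_BOLD_neural_ranges get_BOLD_neural_ranges_alt
  rw [Prod.mk.injEq]
  constructor
  -- BOLD dict
  · have hcongr : ∀ (d : PySem.Dict Int (List Int)) (i : Int),
        i ∈ PySem.List.pyRange 0 ns 1 →
        (if PySem.List.pyGetD
              (PySem.List.pyGetD ((PySem.List.pyRange 0 ns 1).map (fun row => [row, row + hs - 1])) i []) 1 0 ≤ ns
         then d.insert i (PySem.List.pyGetD ((PySem.List.pyRange 0 ns 1).map (fun row => [row, row + hs - 1])) i []) else d)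
        = (if i + hs - 1 ≤ ns then d.insert i [i, i + hs - 1] else d) := by
      intro d i hi
      obtain ⟨h0, hn⟩ := PySem.List.mem_pyRange_one.mp hi
      rw [PySem.List.pyGetD_map_pyRange_of_nonneg _ _ _ _ h0 hn]
      norm_num [PySem.List.pyGetD]
    rw [PySem.List.foldl_congr_mem _ _ _ _ hcongr]
    rw [loop_eq_clipped ns 0 (ns - hs + 2) (fun i => [i, i + hs - 1]) _ (by intro i h0; omega)]
    rw [show max (0 : Int) 0 = 0 by omega]
  -- neural dict
  · have hcongr : ∀ (d : PySem.Dict Int (List Int)) (i : Int),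
        i ∈ PySem.List.pyRange 0 bs 1 →
        (if PySem.List.pyGetD
              (PySem.List.pyGetD ((PySem.List.pyRange 0 bs 1).map (fun row => [row - hs + 1, row])) i []) 0 0 ≥ 0 ∧
            PySem.List.pyGetD
              (PySem.List.pyGetD ((PySem.List.pyRange 0 bs 1).map (fun row => [row - hs + 1, row])) i []) 1 0 < ns
         then d.insert i (PySem.List.pyGetD ((PySem.List.pyRange 0 bs 1).map (fun row => [row - hs + 1, row])) i []) else d)
        = (if i - hs + 1 ≥ 0 ∧ i < ns then d.insert i [i - hs + 1, i] else d) := by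
      intro d i hi
      obtain ⟨h0, hn⟩ := PySem.List.mem_pyRange_one.mp hi
      rw [PySem.List.pyGetD_map_pyRange_of_nonneg _ _ _ _ h0 hn]
      norm_num [PySem.List.pyGetD]
    rw [PySem.List.foldl_congr_mem _ _ _ _ hcongr]
    rw [loop_eq_clipped bs (hs - 1) ns (fun i => [i - hs + 1, i]) _ (by intro i h0; omega)]

-- ===== VERDICT (by name: the statement is the Claim_ definition above) =====
theorem get_BOLD_neural_ranges_spec : Claim_equal_get_BOLD_neural_ranges := by
  intro n b h _ hpre
  obtain ⟨hn, hb, hh⟩ := hpre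
  obtain ⟨ns, rfl⟩ := Option.isSome_iff_exists.mp hn
  obtain ⟨bs, rfl⟩ := Option.isSome_iff_exists.mp hb
  obtain ⟨hs, rfl⟩ := Option.isSome_iff_exists.mp hh
  exact get_BOLD_neural_ranges_eq_alt ns bs hs
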